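-- pv_equiv track=rewrite | github.com/Ks-Classic/numbers-ai | scripts/base_statistics/02_extreme_cube/02-02_並び型分析/pattern_classifier.py | is_l_shape_bottom_right
-- ===== SOURCE A (Python) =====
-- from typing import List, Optional, Tuple, Dict, Any, Set, Union
--
-- def is_l_shape_bottom_right(positions: List[Tuple[int, int]]) -> bool:
--     """┘字型（右下L字）かどうかを判定する
--
--     縦方向が上から下に伸び、横方向が左に伸びるL字。
--     縦方向は2行目→3行目、または3行目→4行目で連続。
--     横方向は同じ行内で連続（左に伸びる、2桁まで）。
--     角は縦方向の下の点と横方向の右端が同じ位置。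
--
--     Args:
--         positions: 当選数字の位置リスト（3つの位置、1-indexed）
--
--     Returns:
--         ┘字型の場合True
--     """
--     if len(positions) != 3:
--         return False
--
--     # 2つが同じ行にあり、1つが別の行にあるか確認
--     rows = [p[0] for p in positions]
--     row_counts = {}
--     for row in rows:
--         row_counts[row] = row_counts.get(row, 0) + 1
--
--     # 2つが同じ行、1つが別の行
--     if sorted(row_counts.values()) != [1, 2]:
--         return False
--
--     # 同じ行の2つの位置を取得
--     horizontal_positions = [p for p in positions if rows.count(p[0]) == 2]
--     vertical_position = [p for p in positions if rows.count(p[0]) == 1][0]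
--
--     # 横方向の2つが隣接しているか確認（列の差が1）
--     horizontal_sorted = sorted(horizontal_positions, key=lambda p: p[1])
--     if horizontal_sorted[1][1] - horizontal_sorted[0][1] != 1:
--         return False
--
--     # 縦方向が横方向の行の下の行にあるか確認（行の差が1）
--     # ┘字型の場合: 縦方向が上（小さい行）、横方向が下（大きい行）
--     horizontal_row = horizontal_positions[0][0]
--     vertical_row = vertical_position[0]
--
--     # 縦方向が横方向の上の行にあるか確認（行の差が1）
--     if vertical_row != horizontal_row - 1:
--         return False
--
--     # 角の位置を確認: 縦方向の下の点と横方向の右端が同じ位置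
--     # つまり、vertical_positionの行+1と列が、horizontal_sorted[1]の行と列が同じ
--     corner_row = vertical_row + 1  # 縦方向の下の点の行
--     corner_col = horizontal_sorted[1][1]  # 横方向の右端の列
--
--     # 角の位置が一致するか確認（縦方向の下の点 = 横方向の右端）
--     if corner_row == horizontal_row and corner_col == horizontal_sorted[1][1]:
--         # 縦方向の位置が角の上にあるか確認
--         if vertical_position[0] == corner_row - 1 and vertical_position[1] == corner_col:
--             # 横方向が左に伸びているか確認（右端が角、左端が角-1）
--             if horizontal_sorted[0][1] == corner_col - 1:
--                 return True
--
--     return False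
-- ===== SOURCE B (Python) =====
-- def is_l_shape_bottom_right(positions):
--     if len(positions) != 3:
--         return False
--     for p in positions:
--         if (p[0] - 1, p[1]) in positions and (p[0], p[1] - 1) in positions:
--             return True
--     return False
-- ===== Notes on version B (the rewrite author's own statement) =====
-- stated objective: simpler
-- what changed: A's pipeline of row-count dict, sorted-value pattern check, filters and a column sort is replaced by directly probing each position as the candidate corner (r,c) and testing membership of (r-1,c) and (r,c-1) in the 3-element list.
import Mathlib
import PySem

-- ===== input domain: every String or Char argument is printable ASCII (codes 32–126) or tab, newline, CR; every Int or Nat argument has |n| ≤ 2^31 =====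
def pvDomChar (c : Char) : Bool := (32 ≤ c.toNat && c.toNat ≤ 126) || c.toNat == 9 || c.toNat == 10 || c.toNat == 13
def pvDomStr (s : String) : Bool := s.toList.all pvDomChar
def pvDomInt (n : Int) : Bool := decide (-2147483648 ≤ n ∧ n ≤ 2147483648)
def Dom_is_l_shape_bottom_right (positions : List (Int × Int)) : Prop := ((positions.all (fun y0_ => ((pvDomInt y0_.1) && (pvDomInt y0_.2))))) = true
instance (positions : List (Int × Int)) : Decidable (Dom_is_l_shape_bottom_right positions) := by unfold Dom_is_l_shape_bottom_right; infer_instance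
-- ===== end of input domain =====

-- B replaces A's row-count/filter/sort pipeline by a direct probe: each position is tried
-- as the corner (r,c) and B checks that (r-1,c) and (r,c-1) are also present (objective: simpler).

-- ===== PORT A =====
def is_l_shape_bottom_right (positions : List (Int × Int)) : Bool :=
  if positions.length ≠ 3 then false
  else
    let rows := positions.map Prod.fst
    let row_counts : PySem.Dict Int Int :=
      rows.foldl (fun d row => d.insert row (d.getD row 0 + 1)) PySem.Dict.empty
    if PySem.List.sorted row_counts.values (fun x => x) false ≠ [(1 : Int), 2] then false
    else
      let horizontal_positions := positions.filter (fun p => PySem.List.count rows p.1 = 2)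
      -- Python indexes [0]; unreachable 'none' (the [1,2] guard forces a unique single row) maps to false
      match PySem.List.pyGet? (positions.filter (fun p => PySem.List.count rows p.1 = 1)) 0 with
      | none => false
      | some vertical_position =>
        let horizontal_sorted := PySem.List.sorted horizontal_positions (fun p => p.2) false
        match PySem.List.pyGet? horizontal_sorted 0, PySem.List.pyGet? horizontal_sorted 1,
              PySem.List.pyGet? horizontal_positions 0 with
        | some hs0, some hs1, some hp0 =>
          if hs1.2 - hs0.2 ≠ 1 then false
          else
            let horizontal_row := hp0.1
            let vertical_row := vertical_position.1
            if vertical_row ≠ horizontal_row - 1 then false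
            else
              let corner_row := vertical_row + 1
              let corner_col := hs1.2
              if corner_row = horizontal_row ∧ corner_col = hs1.2 then
                if vertical_position.1 = corner_row - 1 ∧ vertical_position.2 = corner_col then
                  if hs0.2 = corner_col - 1 then true else false
                else false
              else false
        | _, _, _ => false

-- ===== PORT B =====
def is_l_shape_bottom_right_alt (positions : List (Int × Int)) : Bool :=
  if positions.length ≠ 3 then false
  else positions.any (fun p =>
    positions.contains (p.1 - 1, p.2) && positions.contains (p.1, p.2 - 1))

-- ===== PRECONDITION & SPEC =====
def Spec_is_l_shape_bottom_right (positions : List (Int × Int)) (out : Bool) : Prop := out = is_l_shape_bottom_right_alt positions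
instance (positions : List (Int × Int)) (out : Bool) : Decidable (Spec_is_l_shape_bottom_right positions out) := by unfold Spec_is_l_shape_bottom_right; infer_instance

-- ===== CLAIM (what is proved, stated in full; the proofs are below) =====
def Claim_equal_is_l_shape_bottom_right : Prop := ∀ (positions : List (Int × Int)), Dom_is_l_shape_bottom_right positions → Spec_is_l_shape_bottom_right positions (is_l_shape_bottom_right positions)

-- ===== LEMMAS AND PROOFS =====

-- ===== VERDICT (by name: the statement is the Claim_ definition above) =====
set_option maxHeartbeats 1000000 in
theorem is_l_shape_bottom_right_spec : Claim_equal_is_l_shape_bottom_right := by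
  intro positions _
  unfold Spec_is_l_shape_bottom_right
  rcases positions with _|⟨⟨a1,a2⟩,_|⟨⟨b1,b2⟩,_|⟨⟨c1,c2⟩,_|⟨d,l⟩⟩⟩⟩
  · rfl
  · rfl
  · rfl
  · simp only [is_l_shape_bottom_right, is_l_shape_bottom_right_alt, PySem.Dict.insert,
      PySem.Dict.getD, PySem.Dict.get?, PySem.Dict.values, PySem.Dict.empty,
      PySem.List.sorted, PySem.List.count, PySem.List.pyGet?, PySem.List.pyIdx?,
      List.foldl, List.map, List.filter, List.count, List.any, List.contains]
    by_cases h1 : a1 = b1 <;> by_cases h2 : a1 = c1 <;> by_cases h3 : b1 = c1 <;>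
      (try subst h1) <;> (try subst h2) <;> (try subst h3) <;>
      (try have h1' : b1 ≠ a1 := fun e => h1 e.symm) <;>
      (try have h2' : c1 ≠ a1 := fun e => h2 e.symm) <;>
      (try have h3' : c1 ≠ b1 := fun e => h3 e.symm) <;>
      simp_all [PySem.List.insertBy] <;> split_ifs <;> simp_all <;>
        first
          | omega
          | (rw [Bool.eq_iff_iff]
             simp only [Bool.and_eq_true, Bool.or_eq_true, decide_eq_true_eq]
             omega)
  · simp [is_l_shape_bottom_right, is_l_shape_bottom_right_alt]
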